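-- pv_equiv track=rewrite | github.com/ba-00001/AI-110 | week-1/playlist-chaos-completed/playlist_logic.py | history_summary
-- ===== SOURCE A (Python) =====
-- from typing import Dict, List, Optional, Tuple
--
-- Song = Dict[str, object]
--
-- def history_summary(history: List[Song]) -> Dict[str, int]:
--     """Return a summary of moods seen in the history (safe for unknown mood values)."""
--     counts = {"Hype": 0, "Chill": 0, "Mixed": 0}
--     for song in history:
--         mood = str(song.get("mood", "Mixed") or "Mixed")
--         if mood not in counts:
--             counts["Mixed"] += 1
--         else:
--             counts[mood] += 1
--     return counts
-- ===== SOURCE B (Python) =====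
-- def history_summary(history):
--     """Staged passes: first normalize all moods into a list, then count the
--     two known labels with list.count scans and derive Mixed by complement.
--     No dict accumulator and no per-song branching."""
--     moods = [str(s.get("mood", "Mixed") or "Mixed") for s in history]
--     hype = moods.count("Hype")
--     chill = moods.count("Chill")
--     return {"Hype": hype, "Chill": chill, "Mixed": len(moods) - hype - chill}
-- ===== Notes on version B (the rewrite author's own statement) =====
-- stated objective: alternative
-- what changed: A makes one pass with a pre-seeded dict and a three-way membership branch per song; B has no dict and no branch: it first materializes the list of normalized moods, then runs two list.count scans for Hype and Chill and derives Mixed as the complement len - hype - chill.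
import Mathlib
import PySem

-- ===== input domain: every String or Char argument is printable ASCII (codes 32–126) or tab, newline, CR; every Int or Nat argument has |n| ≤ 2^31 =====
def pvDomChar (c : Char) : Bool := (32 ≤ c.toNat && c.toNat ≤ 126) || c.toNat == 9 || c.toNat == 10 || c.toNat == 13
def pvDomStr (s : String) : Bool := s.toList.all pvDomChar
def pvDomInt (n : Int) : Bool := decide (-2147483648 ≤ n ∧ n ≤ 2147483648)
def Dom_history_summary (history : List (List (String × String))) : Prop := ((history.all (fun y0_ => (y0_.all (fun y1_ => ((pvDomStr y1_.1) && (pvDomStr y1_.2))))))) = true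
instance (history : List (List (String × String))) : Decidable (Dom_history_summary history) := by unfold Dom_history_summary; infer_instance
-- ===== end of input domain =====

-- B replaces A's dict accumulator with staged passes: it maps the normalized moods to a list,
-- counts "Hype" and "Chill" with list.count, and derives Mixed by complement; alternative decomposition, no speed claim.

-- ===== PORT A =====
-- mood = str(song.get("mood", "Mixed") or "Mixed")  (both sources; values are strings, so str() is identity and 'or' replaces the empty string)
def pvMoodOf (song : List (String × String)) : String :=
  let m := (PySem.Dict.mk song).getD "mood" "Mixed"
  if m = "" then "Mixed" else m

def history_summary (history : List (List (String × String))) : List (String × Int) :=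
  let counts : PySem.Dict String Int := PySem.Dict.mk [("Hype", 0), ("Chill", 0), ("Mixed", 0)]
  let counts := history.foldl (fun counts song =>
    let mood := pvMoodOf song
    if counts.contains mood = false then counts.modify "Mixed" 0 (· + 1)
    else counts.modify mood 0 (· + 1)) counts
  counts.items

-- ===== PORT B =====
def history_summary_alt (history : List (List (String × String))) : List (String × Int) :=
  let moods := history.map pvMoodOf
  let hype : Int := PySem.List.count moods "Hype"
  let chill : Int := PySem.List.count moods "Chill"
  [("Hype", hype), ("Chill", chill), ("Mixed", (moods.length : Int) - hype - chill)]

-- ===== PRECONDITION & SPEC =====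
def Spec_history_summary (history : List (List (String × String))) (out : List (String × Int)) : Prop := out = history_summary_alt history
instance (history : List (List (String × String))) (out : List (String × Int)) : Decidable (Spec_history_summary history out) := by unfold Spec_history_summary; infer_instance

-- ===== CLAIM (what is proved, stated in full; the proofs are below) =====
def Claim_equal_history_summary : Prop := ∀ (history : List (List (String × String))), Dom_history_summary history → Spec_history_summary history (history_summary history)

-- ===== LEMMAS AND PROOFS =====

-- A's loop keeps the three pre-seeded keys and adds one to exactly one bucket per song.
lemma A_loop (l : List (List (String × String))) : ∀ h c m : Int,
    l.foldl (fun counts song =>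
      let mood := pvMoodOf song
      if counts.contains mood = false then counts.modify "Mixed" 0 (· + 1)
      else counts.modify mood 0 (· + 1))
      (PySem.Dict.mk [("Hype", h), ("Chill", c), ("Mixed", m)]) =
    PySem.Dict.mk [("Hype", h + (l.countP (fun s => pvMoodOf s == "Hype") : Int)),
                   ("Chill", c + (l.countP (fun s => pvMoodOf s == "Chill") : Int)),
                   ("Mixed", m + (l.countP (fun s => !(pvMoodOf s == "Hype") && !(pvMoodOf s == "Chill")) : Int))] := by
  induction l with
  | nil => intro h c m; simp
  | cons x t ih =>
    intro h c m
    simp only [List.foldl_cons, List.countP_cons]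
    by_cases hH : pvMoodOf x = "Hype"
    · have hstep : (if (PySem.Dict.mk [("Hype", h), ("Chill", c), ("Mixed", m)]).contains (pvMoodOf x) = false then (PySem.Dict.mk [("Hype", h), ("Chill", c), ("Mixed", m)]).modify "Mixed" 0 (· + 1)
          else (PySem.Dict.mk [("Hype", h), ("Chill", c), ("Mixed", m)]).modify (pvMoodOf x) 0 (· + 1))
          = PySem.Dict.mk [("Hype", h + 1), ("Chill", c), ("Mixed", m)] := by
        simp [hH, PySem.Dict.modify, PySem.Dict.insert, PySem.Dict.getD, PySem.Dict.get?, PySem.Dict.contains]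
      rw [hstep, ih]
      simp [hH]
      omega
    · by_cases hC : pvMoodOf x = "Chill"
      · have hstep : (if (PySem.Dict.mk [("Hype", h), ("Chill", c), ("Mixed", m)]).contains (pvMoodOf x) = false then (PySem.Dict.mk [("Hype", h), ("Chill", c), ("Mixed", m)]).modify "Mixed" 0 (· + 1)
            else (PySem.Dict.mk [("Hype", h), ("Chill", c), ("Mixed", m)]).modify (pvMoodOf x) 0 (· + 1))
            = PySem.Dict.mk [("Hype", h), ("Chill", c + 1), ("Mixed", m)] := by
          simp [hC, PySem.Dict.modify, PySem.Dict.insert, PySem.Dict.getD, PySem.Dict.get?, PySem.Dict.contains]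
        rw [hstep, ih]
        simp [hC]
        omega
      · have hstep : (if (PySem.Dict.mk [("Hype", h), ("Chill", c), ("Mixed", m)]).contains (pvMoodOf x) = false then (PySem.Dict.mk [("Hype", h), ("Chill", c), ("Mixed", m)]).modify "Mixed" 0 (· + 1)
            else (PySem.Dict.mk [("Hype", h), ("Chill", c), ("Mixed", m)]).modify (pvMoodOf x) 0 (· + 1))
            = PySem.Dict.mk [("Hype", h), ("Chill", c), ("Mixed", m + 1)] := by
          by_cases hM : pvMoodOf x = "Mixed"
          · simp [hM, PySem.Dict.modify, PySem.Dict.insert, PySem.Dict.getD, PySem.Dict.get?, PySem.Dict.contains]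
          · have hcont : (PySem.Dict.mk [("Hype", h), ("Chill", c), ("Mixed", m)]).contains (pvMoodOf x) = false := by
              simp [PySem.Dict.contains]
              exact ⟨fun e => hH e.symm, fun e => hC e.symm, fun e => hM e.symm⟩
            rw [if_pos hcont]
            simp [PySem.Dict.modify, PySem.Dict.insert, PySem.Dict.getD, PySem.Dict.get?, PySem.Dict.contains]
        rw [hstep, ih]
        simp [hH, hC]
        omega

-- each song falls in exactly one of the three buckets
lemma count_partition (l : List (List (String × String))) :
    l.countP (fun s => pvMoodOf s == "Hype") + l.countP (fun s => pvMoodOf s == "Chill")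
      + l.countP (fun s => !(pvMoodOf s == "Hype") && !(pvMoodOf s == "Chill")) = l.length := by
  induction l with
  | nil => simp
  | cons x t ih =>
    simp only [List.countP_cons, List.length_cons]
    by_cases hH : pvMoodOf x = "Hype" <;> by_cases hC : pvMoodOf x = "Chill" <;>
      simp [hH, hC] at * <;> omega

-- B's list.count over the mapped moods is the bucket count over the songs
lemma B_count (history : List (List (String × String))) (v : String) :
    PySem.List.count (history.map pvMoodOf) v
      = (history.countP (fun s => pvMoodOf s == v) : Int) := by
  simp [PySem.List.count_eq, List.count_eq_countP, List.countP_map, Function.comp_def]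

-- ===== VERDICT (by name: the statement is the Claim_ definition above) =====
theorem history_summary_spec : Claim_equal_history_summary := by
  intro history _
  unfold Spec_history_summary
  show (history.foldl (fun counts song =>
      let mood := pvMoodOf song
      if counts.contains mood = false then counts.modify "Mixed" 0 (· + 1)
      else counts.modify mood 0 (· + 1))
      (PySem.Dict.mk [("Hype", 0), ("Chill", 0), ("Mixed", 0)])).items =
    [("Hype", (PySem.List.count (history.map pvMoodOf) "Hype" : Int)),
     ("Chill", (PySem.List.count (history.map pvMoodOf) "Chill" : Int)),
     ("Mixed", ((history.map pvMoodOf).length : Int)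
        - (PySem.List.count (history.map pvMoodOf) "Hype" : Int)
        - (PySem.List.count (history.map pvMoodOf) "Chill" : Int))]
  rw [A_loop]
  simp only [B_count, List.length_map]
  have hpart := count_partition history
  simp only [PySem.Dict.items, PySem.Dict.mk, List.cons.injEq, Prod.mk.injEq, true_and, and_true]
  refine ⟨by omega, by omega, by omega⟩
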